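-- pv_equiv track=rewrite | github.com/aounleonardo/Spread-Classification | fetch/tweets/prune_retweet_tree.py | get_unwanted_tweet_ids
-- ===== SOURCE A (Python) =====
-- from typing import Any, Dict, List, Optional, Set, Tuple, Union
--
-- def get_branch_size(
--     node_id: str, children: Dict[str, List[str]], dp: Dict[str, int]
-- ) -> int:
--     if node_id not in children:
--         return 1
--     if node_id not in dp:
--         children_lengths = [
--             get_branch_size(child_id, children, dp) for child_id in children[node_id]
--         ]
--         dp[node_id] = sum(children_lengths) + 1
--     return dp[node_id]
--
-- def get_unwanted_tweet_ids(
--     tweets: Dict[str, Dict[str, Any]],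
--     children: Dict[str, List[str]],
--     min_branch_size: int,
-- ) -> Set[str]:
--     children_ids = set(
--         child_id for tweet_children in children.values() for child_id in tweet_children
--     )
--
--     branch_head_ids = set(children.keys()) - children_ids
--
--     dp = {}
--     unwanted_branches = set(
--         branch
--         for branch in branch_head_ids
--         if get_branch_size(branch, children, dp) < min_branch_size
--     )
--
--     return set(
--         tweet_id
--         for head_id in unwanted_branches
--         for tweet_id in [head_id] + children.get(head_id, [])
--     )
-- ===== SOURCE B (Python) =====
-- def get_unwanted_tweet_ids(tweets, children, min_branch_size):
--     child_ids = set()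
--     for tweet_children in children.values():
--         child_ids.update(tweet_children)
--
--     unwanted = set()
--     for head in children:
--         if head in child_ids:
--             continue
--         # count nodes of the branch iteratively, stopping as soon as the
--         # count reaches min_branch_size (only "< min_branch_size" matters)
--         stack = [head]
--         count = 0
--         while stack and count < min_branch_size:
--             node = stack.pop()
--             count += 1
--             stack.extend(children.get(node, []))
--         if count < min_branch_size:
--             unwanted.add(head)
--             unwanted.update(children.get(head, []))
--     return unwanted
-- ===== Notes on version B (the rewrite author's own statement) =====
-- stated objective: alternative
-- what changed: Replaces the recursive memoized get_branch_size (dp dict threaded through a recursion) by an iterative per-root stack loop that just counts popped nodes and stops early once the count reaches min_branch_size; root discovery and result collection become one incremental pass over the keys.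
import Mathlib
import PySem

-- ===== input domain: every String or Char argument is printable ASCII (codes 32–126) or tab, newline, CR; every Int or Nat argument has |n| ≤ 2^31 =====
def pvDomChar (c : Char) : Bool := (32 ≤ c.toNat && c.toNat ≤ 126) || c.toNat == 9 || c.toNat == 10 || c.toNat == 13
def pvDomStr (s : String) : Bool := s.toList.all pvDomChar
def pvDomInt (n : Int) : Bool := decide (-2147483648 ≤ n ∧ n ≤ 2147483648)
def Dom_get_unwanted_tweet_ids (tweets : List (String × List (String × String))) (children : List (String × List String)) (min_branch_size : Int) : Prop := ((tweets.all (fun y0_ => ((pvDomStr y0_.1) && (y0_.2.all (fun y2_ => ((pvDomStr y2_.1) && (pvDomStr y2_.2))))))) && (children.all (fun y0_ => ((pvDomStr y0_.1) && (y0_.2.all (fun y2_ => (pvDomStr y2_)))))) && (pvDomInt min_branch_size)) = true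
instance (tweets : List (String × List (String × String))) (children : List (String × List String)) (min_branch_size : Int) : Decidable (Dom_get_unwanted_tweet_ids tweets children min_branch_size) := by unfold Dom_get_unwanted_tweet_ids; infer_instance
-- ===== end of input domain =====

-- B replaces A's memoized recursive branch-size computation by an iterative per-root
-- node count with an early exit at min_branch_size ("alternative"; no recursion, no memo).

-- ===== PORT A =====
-- transliteration of get_branch_size, threading the dp dict; fuel (children.length + 1)
-- bounds the recursion depth, which Pre_ (acyclicity) guarantees is never reached
def pvGbs (children : PySem.Dict String (List String)) :
    Nat → String → PySem.Dict String Int → Int × PySem.Dict String Int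
  | 0, _, dp => (0, dp)
  | f+1, n, dp =>
    if children.contains n = false then (1, dp)
    else if dp.contains n = false then
      let r := (children.getD n []).foldl
        (fun (acc : List Int × PySem.Dict String Int) c =>
          let p := pvGbs children f c acc.2
          (acc.1 ++ [p.1], p.2)) ([], dp)
      let dp2 := r.2.insert n (r.1.sum + 1)
      (dp2.getD n 0, dp2)
    else (dp.getD n 0, dp)

def get_unwanted_tweet_ids (tweets : List (String × List (String × String))) (children : List (String × List String)) (min_branch_size : Int) : List String :=
  let ch : PySem.Dict String (List String) := PySem.Dict.mk children
  let children_ids : PySem.Set String :=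
    PySem.Set.ofList (ch.values.flatMap (fun tweet_children => tweet_children))
  let branch_head_ids : PySem.Set String :=
    PySem.Set.diff (PySem.Set.ofList ch.keys) children_ids
  let r := branch_head_ids.foldl
    (fun (acc : List String × PySem.Dict String Int) branch =>
      let p := pvGbs ch (children.length + 1) branch acc.2
      (if p.1 < min_branch_size then acc.1 ++ [branch] else acc.1, p.2))
    ([], PySem.Dict.empty)
  let unwanted_branches : PySem.Set String := PySem.Set.ofList r.1
  PySem.Set.ofList (unwanted_branches.flatMap (fun head_id => head_id :: ch.getD head_id []))

-- ===== PORT B =====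
-- the while loop of Source B: pop the last stack element, count it, push its children;
-- stops as soon as count reaches min_branch_size (hence total, no fuel needed)
def pvCount (children : PySem.Dict String (List String)) (min_branch_size : Int)
    (stack : List String) (count : Int) : Int :=
  if h : stack = [] ∨ ¬ count < min_branch_size then count
  else
    let node := stack.getLast (by exact fun hn => h (Or.inl hn))
    pvCount children min_branch_size (stack.dropLast ++ children.getD node []) (count + 1)
termination_by (min_branch_size - count).toNat
decreasing_by
  have : count < min_branch_size := by
    rcases not_or.mp h with ⟨_, h2⟩; exact not_not.mp h2
  omega

def get_unwanted_tweet_ids_alt (tweets : List (String × List (String × String))) (children : List (String × List String)) (min_branch_size : Int) : List String :=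
  let ch : PySem.Dict String (List String) := PySem.Dict.mk children
  let child_ids : PySem.Set String :=
    ch.values.foldl (fun s tweet_children => PySem.Set.update s tweet_children) PySem.Set.empty
  ch.keys.foldl
    (fun (unwanted : PySem.Set String) head =>
      if child_ids.contains head then unwanted
      else if pvCount ch min_branch_size [head] 0 < min_branch_size then
        PySem.Set.update (PySem.Set.add unwanted head) (ch.getD head [])
      else unwanted)
    PySem.Set.empty

-- ===== PRECONDITION & SPEC =====
-- children.get(node, []) of the Python, as a function of the raw association list
def pvKids (children : List (String × List String)) (n : String) : List String :=
  ((PySem.Dict.mk children).get? n).getD []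

-- one saturation step of the child-reachability closure: append the not-yet-seen children
def pvStep (children : List (String × List String)) (s : List String) : List String :=
  s ++ ((s.flatMap (pvKids children)).filter (fun x => decide (x ∉ s))).dedup

-- all nodes reachable from s0 through the children map (enough iterations to saturate)
def pvClosure (children : List (String × List String)) (s0 : List String) : List String :=
  (pvStep children)^[(children.flatMap (fun p => p.2)).length + 1] s0.dedup

-- the branch heads: keys of children that occur in no child list
def pvHeads (children : List (String × List String)) : List String :=
  (PySem.Dict.mk children).keys.filter (fun k => decide (k ∉ children.flatMap (fun p => p.2)))

-- Pre_ excludes (a) association lists with duplicate keys, which no Python dict can produce,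
-- and (b) inputs where some node reachable from a branch head lies on a directed cycle:
-- exactly there Python A's recursive branch-size computation does not terminate and raises.
def Pre_get_unwanted_tweet_ids (tweets : List (String × List (String × String))) (children : List (String × List String)) (min_branch_size : Int) : Prop :=
  (children.map Prod.fst).Nodup ∧
  ∀ h ∈ pvHeads children, ∀ x ∈ pvClosure children [h], x ∉ pvClosure children (pvKids children x)
instance (tweets : List (String × List (String × String))) (children : List (String × List String)) (min_branch_size : Int) : Decidable (Pre_get_unwanted_tweet_ids tweets children min_branch_size) := by unfold Pre_get_unwanted_tweet_ids; infer_instance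

def pvWitness_get_unwanted_tweet_ids : (List (String × List (String × String))) × (List (String × List String)) × Int :=
  ([("a", [("text", "hi")])], [("a", ["b", "c"]), ("b", ["d"])], 3)

def Spec_get_unwanted_tweet_ids (tweets : List (String × List (String × String))) (children : List (String × List String)) (min_branch_size : Int) (out : List String) : Prop := out = get_unwanted_tweet_ids_alt tweets children min_branch_size
instance (tweets : List (String × List (String × String))) (children : List (String × List String)) (min_branch_size : Int) (out : List String) : Decidable (Spec_get_unwanted_tweet_ids tweets children min_branch_size out) := by unfold Spec_get_unwanted_tweet_ids; infer_instance

-- ===== CLAIM =====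
def Claim_equal_get_unwanted_tweet_ids : Prop := ∀ (tweets : List (String × List (String × String))) (children : List (String × List String)) (min_branch_size : Int), Dom_get_unwanted_tweet_ids tweets children min_branch_size → Pre_get_unwanted_tweet_ids tweets children min_branch_size → Spec_get_unwanted_tweet_ids tweets children min_branch_size (get_unwanted_tweet_ids tweets children min_branch_size)

-- ===== LEMMAS AND PROOFS =====

-- the edge relation of the children map
def pvE (children : List (String × List String)) (a b : String) : Prop := b ∈ pvKids children a

lemma pvKids_mem_keys {children : List (String × List String)} {n : String}
    (h : pvKids children n ≠ []) : n ∈ (PySem.Dict.mk children).keys := by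
  unfold pvKids at h
  rcases hg : (PySem.Dict.mk children).get? n with _ | v
  · rw [hg] at h; simp at h
  · have : (PySem.Dict.mk children).contains n = true := by
      rw [PySem.Dict.contains_eq_isSome_get?, hg]; rfl
    exact (PySem.Dict.contains_iff_mem_keys _ _).mp this

lemma pvKids_subset_flat {children : List (String × List String)} {n : String} :
    pvKids children n ⊆ children.flatMap (fun p => p.2) := by
  unfold pvKids
  rcases hg : (PySem.Dict.mk children).get? n with _ | v
  · simp
  · have hmem : (n, v) ∈ children := PySem.Dict.mem_items_of_get?_eq_some _ hg
    intro x hx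
    exact List.mem_flatMap.mpr ⟨(n, v), hmem, hx⟩

lemma pvStep_supset {children : List (String × List String)} {s : List String} :
    s ⊆ pvStep children s := List.subset_append_left _ _

lemma pvStep_nodup {children : List (String × List String)} {s : List String}
    (hs : s.Nodup) : (pvStep children s).Nodup := by
  unfold pvStep
  rw [List.nodup_append]
  refine ⟨hs, List.nodup_dedup _, ?_⟩
  intro x hx y hy
  have hy3 := List.of_mem_filter (List.mem_dedup.mp hy)
  simp at hy3
  exact fun heq => hy3 (heq ▸ hx)

lemma pvStep_subset_univ {children : List (String × List String)} {s u : List String}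
    (h1 : s ⊆ u) (h2 : children.flatMap (fun p => p.2) ⊆ u) : pvStep children s ⊆ u := by
  unfold pvStep
  intro x hx
  rcases List.mem_append.mp hx with hx | hx
  · exact h1 hx
  · have hx' := List.mem_dedup.mp hx
    have := List.mem_of_mem_filter hx'
    rcases List.mem_flatMap.mp this with ⟨n, _, hk⟩
    exact h2 (pvKids_subset_flat hk)

lemma pvStep_length_lt {children : List (String × List String)} {s : List String}
    (h : pvStep children s ≠ s) : s.length < (pvStep children s).length := by
  by_cases hnew : ((s.flatMap (pvKids children)).filter (fun x => decide (x ∉ s))).dedup = []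
  · exact absurd (by unfold pvStep; rw [hnew]; simp) h
  · unfold pvStep
    rw [List.length_append]
    have h0 : ((s.flatMap (pvKids children)).filter (fun x => decide (x ∉ s))).dedup.length ≠ 0 :=
      fun hz => hnew (List.eq_nil_of_length_eq_zero hz)
    omega

lemma pvStep_fix_closed {children : List (String × List String)} {s : List String}
    (h : pvStep children s = s) : ∀ n ∈ s, pvKids children n ⊆ s := by
  have hnil : ((s.flatMap (pvKids children)).filter (fun x => decide (x ∉ s))).dedup = [] := by
    have hlen := congrArg List.length h
    simp only [pvStep, List.length_append] at hlen
    exact List.eq_nil_of_length_eq_zero (by omega)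
  intro n hn c hc
  by_contra hcs
  have hmem : c ∈ ((s.flatMap (pvKids children)).filter (fun x => decide (x ∉ s))).dedup := by
    rw [List.mem_dedup, List.mem_filter]
    exact ⟨List.mem_flatMap.mpr ⟨n, hn, hc⟩, by simpa using hcs⟩
  rw [hnil] at hmem
  simp at hmem

lemma pvClosure_fix (children : List (String × List String)) (s0 : List String) :
    pvStep children (pvClosure children s0) = pvClosure children s0 := by
  have hinv : ∀ i, ((pvStep children)^[i] s0.dedup).Nodup ∧
      ((pvStep children)^[i] s0.dedup) ⊆ s0.dedup ++ children.flatMap (fun p => p.2) := by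
    intro i
    induction i with
    | zero => exact ⟨s0.nodup_dedup, List.subset_append_left _ _⟩
    | succ i ih =>
      rw [Function.iterate_succ_apply']
      exact ⟨pvStep_nodup ih.1, pvStep_subset_univ ih.2 (List.subset_append_right _ _)⟩
  set N := (children.flatMap (fun p => p.2)).length + 1 with hN
  have hfix : ∃ i, i < N ∧ pvStep children ((pvStep children)^[i] s0.dedup) = (pvStep children)^[i] s0.dedup := by
    by_contra hno
    push Not at hno
    have hgrow : ∀ i, i ≤ N → s0.dedup.length + i ≤ ((pvStep children)^[i] s0.dedup).length := by
      intro i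
      induction i with
      | zero => simp
      | succ i ih =>
        intro hiN
        have h1 := ih (by omega)
        have h2 := pvStep_length_lt (hno i (by omega))
        rw [Function.iterate_succ_apply']
        omega
    have h1 := hgrow N le_rfl
    have h2 : ((pvStep children)^[N] s0.dedup).length ≤ s0.dedup.length + (children.flatMap (fun p => p.2)).length := by
      obtain ⟨hnd, hsub⟩ := hinv N
      have := (hnd.subperm hsub).length_le
      simpa using this
    omega
  obtain ⟨i, hiN, hfx⟩ := hfix
  have heq : (pvStep children)^[N] s0.dedup = (pvStep children)^[i] s0.dedup := by
    have hsplit : N = (N - i) + i := by omega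
    rw [hsplit, Function.iterate_add_apply, Function.iterate_fixed hfx]
  show pvStep children ((pvStep children)^[N] s0.dedup) = (pvStep children)^[N] s0.dedup
  rw [heq, hfx]

lemma subset_pvClosure (children : List (String × List String)) (s0 : List String) :
    s0 ⊆ pvClosure children s0 := by
  intro x hx
  unfold pvClosure
  have : ∀ i, x ∈ (pvStep children)^[i] s0.dedup := by
    intro i
    induction i with
    | zero => simpa using hx
    | succ i ih => rw [Function.iterate_succ_apply']; exact pvStep_supset ih
  exact this _

lemma reach_mem_pvClosure {children : List (String × List String)} {s0 : List String}
    {x y : String} (h : Relation.ReflTransGen (pvE children) x y)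
    (hx : x ∈ pvClosure children s0) : y ∈ pvClosure children s0 := by
  induction h with
  | refl => exact hx
  | tail _ hbc ih => exact pvStep_fix_closed (pvClosure_fix children s0) _ ih hbc

-- no node reachable from n lies on a cycle
def pvSafe (children : List (String × List String)) (n : String) : Prop :=
  ∀ x, Relation.ReflTransGen (pvE children) n x → ¬ Relation.TransGen (pvE children) x x

lemma pvSafe_self {children : List (String × List String)} {n : String}
    (h : pvSafe children n) : ¬ Relation.TransGen (pvE children) n n :=
  h n Relation.ReflTransGen.refl

lemma pvSafe_child {children : List (String × List String)} {n c : String}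
    (h : pvSafe children n) (hc : c ∈ pvKids children n) : pvSafe children c :=
  fun x hx => h x (Relation.ReflTransGen.head hc hx)

lemma pre_safe {children : List (String × List String)}
    (hpre : ∀ h ∈ pvHeads children, ∀ x ∈ pvClosure children [h], x ∉ pvClosure children (pvKids children x)) :
    ∀ h ∈ pvHeads children, pvSafe children h := by
  intro h hh x hx hT
  have hxclo : x ∈ pvClosure children [h] :=
    reach_mem_pvClosure hx (subset_pvClosure _ _ (List.mem_singleton_self h))
  obtain ⟨y, hy, hyr⟩ := Relation.TransGen.head'_iff.mp hT
  have hy' : y ∈ pvKids children x := hy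
  have hyc : y ∈ pvClosure children (pvKids children x) := subset_pvClosure _ _ hy'
  exact hpre h hh x hxclo (reach_mem_pvClosure hyr hyc)

-- the set of keys reachable from n; its cardinality is the termination measure
noncomputable def pvReach (children : List (String × List String)) (n : String) : Finset String :=
  @Finset.filter String (fun k => Relation.ReflTransGen (pvE children) n k)
    (fun k => Classical.propDecidable _) (PySem.Dict.mk children).keys.toFinset

noncomputable def pvMu (children : List (String × List String)) (n : String) : Nat :=
  (pvReach children n).card

lemma pvMu_le (children : List (String × List String)) (n : String) :
    pvMu children n ≤ children.length := by
  classical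
  unfold pvMu pvReach
  calc _ ≤ (PySem.Dict.mk children).keys.toFinset.card := Finset.card_filter_le _ _
  _ ≤ (PySem.Dict.mk children).keys.length := List.toFinset_card_le _
  _ = children.length := by simp [PySem.Dict.keys]

lemma pvMu_lt {children : List (String × List String)} {n c : String}
    (hnc : ¬ Relation.TransGen (pvE children) n n)
    (hkey : n ∈ (PySem.Dict.mk children).keys) (hc : c ∈ pvKids children n) :
    pvMu children c < pvMu children n := by
  classical
  unfold pvMu
  apply Finset.card_lt_card
  constructor
  · intro k hk
    simp only [pvReach, Finset.mem_filter] at *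
    exact ⟨hk.1, Relation.ReflTransGen.head hc hk.2⟩
  · intro hsub
    have hn_in : n ∈ pvReach children n := by
      simp only [pvReach, Finset.mem_filter]
      exact ⟨List.mem_toFinset.mpr hkey, Relation.ReflTransGen.refl⟩
    have hn_in' := hsub hn_in
    simp only [pvReach, Finset.mem_filter] at hn_in'
    exact hnc (Relation.TransGen.head' hc hn_in'.2)

-- plain (non-memoized) fueled branch size; the common reference for both ports
def pvSz (children : List (String × List String)) : Nat → String → Int
  | 0, _ => 0
  | f+1, n => 1 + ((pvKids children n).map (pvSz children f)).sum

lemma pvSz_nonneg (children : List (String × List String)) :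
    ∀ f n, 0 ≤ pvSz children f n := by
  intro f
  induction f with
  | zero => intro n; simp [pvSz]
  | succ f ih =>
    intro n
    have : 0 ≤ ((pvKids children n).map (pvSz children f)).sum :=
      List.sum_nonneg (by intro x hx; rcases List.mem_map.mp hx with ⟨c, _, rfl⟩; exact ih c)
    simp only [pvSz]; omega

lemma pvSz_stable {children : List (String × List String)} :
    ∀ K n, pvSafe children n → pvMu children n < K → ∀ f g, pvMu children n < f → pvMu children n < g →
      pvSz children f n = pvSz children g n := by
  intro K
  induction K with
  | zero => intro n _ h; omega
  | succ K ih =>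
    intro n hs hK f g hf hg
    rcases f with _ | f'; · omega
    rcases g with _ | g'; · omega
    simp only [pvSz]
    congr 1
    apply congrArg
    apply List.map_congr_left
    intro c hc
    have hkey := pvKids_mem_keys (List.ne_nil_of_mem hc)
    have hlt := pvMu_lt (pvSafe_self hs) hkey hc
    exact ih c (pvSafe_child hs hc) (by omega) f' g' (by omega) (by omega)

-- the true branch size (well-defined under Pre_)
def pvSize (children : List (String × List String)) (n : String) : Int :=
  pvSz children (children.length + 1) n

lemma pvSize_rec {children : List (String × List String)} {n : String}
    (hs : pvSafe children n) :
    pvSize children n = 1 + ((pvKids children n).map (pvSize children)).sum := by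
  unfold pvSize
  simp only [pvSz]
  congr 1
  apply congrArg
  apply List.map_congr_left
  intro c hc
  have hkey := pvKids_mem_keys (List.ne_nil_of_mem hc)
  have hlt : pvMu children c < pvMu children n := pvMu_lt (pvSafe_self hs) hkey hc
  have hlen : pvMu children n ≤ children.length := pvMu_le children n
  exact pvSz_stable (pvMu children c + 1) c (pvSafe_child hs hc) (by omega)
    children.length (children.length + 1) (by omega) (by omega)

lemma pvSize_pos (children : List (String × List String)) (n : String) :
    1 ≤ pvSize children n := by
  unfold pvSize
  have : 0 ≤ ((pvKids children n).map (pvSz children children.length)).sum :=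
    List.sum_nonneg (by intro x hx; rcases List.mem_map.mp hx with ⟨c, _, rfl⟩; exact pvSz_nonneg _ _ _)
  simp only [pvSz]; omega

-- dp invariant of A's memoization
def pvGood (children : List (String × List String)) (dp : PySem.Dict String Int) : Prop :=
  ∀ k v, dp.get? k = some v → v = pvSize children k

lemma pvGbs_correct {children : List (String × List String)} :
    ∀ f n dp, pvSafe children n → pvMu children n < f → pvGood children dp →
      (pvGbs (PySem.Dict.mk children) f n dp).1 = pvSize children n ∧
      pvGood children (pvGbs (PySem.Dict.mk children) f n dp).2 := by
  intro f
  induction f with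
  | zero => intro n dp _ h; omega
  | succ f ih =>
    intro n dp hsafe hμ hdp
    by_cases hcn : (PySem.Dict.mk children).contains n = false
    · have hget : (PySem.Dict.mk children).get? n = none :=
        (PySem.Dict.get?_eq_none_iff_contains _ _).mpr hcn
      have hkids : pvKids children n = [] := by unfold pvKids; rw [hget]; rfl
      have hsize : pvSize children n = 1 := by rw [pvSize_rec hsafe, hkids]; simp
      simp only [pvGbs, hcn, if_true]
      exact ⟨hsize.symm, hdp⟩
    · rw [Bool.not_eq_false] at hcn
      have hkey : n ∈ (PySem.Dict.mk children).keys := (PySem.Dict.contains_iff_mem_keys _ _).mp hcn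
      by_cases hdpc : dp.contains n = false
      · -- compute branch
        have hfold : ∀ (cs : List String), (∀ c ∈ cs, pvSafe children c ∧ pvMu children c < f) →
            ∀ (acc : List Int) (d : PySem.Dict String Int), pvGood children d →
            (cs.foldl (fun (a : List Int × PySem.Dict String Int) c =>
              let p := pvGbs (PySem.Dict.mk children) f c a.2
              (a.1 ++ [p.1], p.2)) (acc, d)).1 = acc ++ cs.map (pvSize children) ∧
            pvGood children (cs.foldl (fun (a : List Int × PySem.Dict String Int) c =>
              let p := pvGbs (PySem.Dict.mk children) f c a.2
              (a.1 ++ [p.1], p.2)) (acc, d)).2 := by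
          intro cs
          induction cs with
          | nil => intro _ acc d hd; exact ⟨by simp, hd⟩
          | cons c cs ihc =>
            intro hcs acc d hd
            obtain ⟨h1, h2⟩ := ih c d (hcs c (List.mem_cons_self)).1 (hcs c (List.mem_cons_self)).2 hd
            simp only [List.foldl_cons]
            obtain ⟨h3, h4⟩ := ihc (fun x hx => hcs x (List.mem_cons_of_mem _ hx))
              (acc ++ [(pvGbs (PySem.Dict.mk children) f c d).1]) _ h2
            constructor
            · rw [h3, h1]; simp
            · exact h4
        have hkidsμ : ∀ c ∈ pvKids children n, pvSafe children c ∧ pvMu children c < f := by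
          intro c hc
          have := pvMu_lt (pvSafe_self hsafe) hkey hc
          exact ⟨pvSafe_child hsafe hc, by omega⟩
        have hgetD : (PySem.Dict.mk children).getD n [] = pvKids children n := rfl
        obtain ⟨h1, h2⟩ := hfold (pvKids children n) hkidsμ [] dp hdp
        simp only [pvGbs, hcn, Bool.true_eq_false, if_false, hdpc, if_true, hgetD]
        rw [h1]
        simp only [List.nil_append]
        have hsum : ((pvKids children n).map (pvSize children)).sum + 1 = pvSize children n := by
          rw [pvSize_rec hsafe]; omega
        constructor
        · rw [PySem.Dict.getD_eq_get?_getD, PySem.Dict.get?_insert_self]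
          simp only [Option.getD_some]
          exact hsum
        · intro k v hkv
          rw [PySem.Dict.get?_insert] at hkv
          split at hkv
          · cases hkv
            subst ‹k = n›
            exact hsum
          · exact h2 k v hkv
      · rw [Bool.not_eq_false] at hdpc
        have hsome : (dp.get? n).isSome := by rw [← PySem.Dict.contains_eq_isSome_get?, hdpc]
        obtain ⟨v, hv⟩ := Option.isSome_iff_exists.mp hsome
        simp only [pvGbs, hcn, Bool.true_eq_false, if_false, hdpc]
        constructor
        · rw [PySem.Dict.getD_eq_get?_getD, hv]
          simp only [Option.getD_some]
          exact hdp n v hv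
        · exact hdp

lemma pvCount_lt_iff {children : List (String × List String)} (m : Int) :
    ∀ stack count, (∀ x ∈ stack, pvSafe children x) →
      (pvCount (PySem.Dict.mk children) m stack count < m ↔
        count + (stack.map (pvSize children)).sum < m) := by
  intro stack count
  fun_induction pvCount (PySem.Dict.mk children) m stack count with
  | case1 stack count h =>
    intro _
    rcases h with h | h
    · subst h; simp
    · have hsum : 0 ≤ (stack.map (pvSize children)).sum := by
        apply List.sum_nonneg
        intro x hx
        rcases List.mem_map.mp hx with ⟨c, _, rfl⟩
        have := pvSize_pos children c
        omega
      omega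
  | case2 stack count h node ih =>
    intro hsafe
    have hcount : count < m := by
      rcases not_or.mp h with ⟨_, h2⟩; exact not_not.mp h2
    have hne : stack ≠ [] := by rcases not_or.mp h with ⟨h1, _⟩; exact h1
    have hnode : node = stack.getLast hne := rfl
    have hlastsafe : pvSafe children node := by
      rw [hnode]; exact hsafe _ (List.getLast_mem hne)
    have hsub : ∀ x ∈ stack.dropLast ++ (PySem.Dict.mk children).getD node [], pvSafe children x := by
      intro x hx
      rcases List.mem_append.mp hx with hx | hx
      · exact hsafe x (List.dropLast_subset _ hx)
      · exact pvSafe_child hlastsafe hx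
    rw [ih hsub]
    have hstack : stack.dropLast ++ [node] = stack := by
      rw [hnode]; exact List.dropLast_concat_getLast hne
    have hgetD : (PySem.Dict.mk children).getD node [] = pvKids children node := rfl
    have hsize := pvSize_rec hlastsafe
    have hsum1 : (stack.map (pvSize children)).sum =
        (stack.dropLast.map (pvSize children)).sum + pvSize children node := by
      conv_lhs => rw [← hstack]
      simp
    have hsum2 : ((stack.dropLast ++ (PySem.Dict.mk children).getD node []).map (pvSize children)).sum =
        (stack.dropLast.map (pvSize children)).sum + ((pvKids children node).map (pvSize children)).sum := by
      rw [hgetD]; simp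
    rw [hsum2]
    omega

-- folding Set.update over the value lists is one Set.update of their concatenation
lemma foldl_update_eq (ls : List (List String)) :
    ∀ s : PySem.Set String, ls.foldl (fun s l => PySem.Set.update s l) s
      = PySem.Set.update s (ls.flatMap (fun l => l)) := by
  induction ls with
  | nil => intro s; simp [PySem.Set.update]
  | cons l ls ih =>
    intro s
    simp only [List.foldl_cons, List.flatMap_cons]
    rw [ih, PySem.Set.update_append]

-- A's fold over the branch heads returns exactly the small heads, in order
lemma pvHeadsFold {children : List (String × List String)} (m : Int) :
    ∀ (hs : List String), (∀ h ∈ hs, pvSafe children h) →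
      ∀ (acc : List String) (dp : PySem.Dict String Int), pvGood children dp →
      (hs.foldl (fun (a : List String × PySem.Dict String Int) b =>
        let p := pvGbs (PySem.Dict.mk children) (children.length + 1) b a.2
        (if p.1 < m then a.1 ++ [b] else a.1, p.2)) (acc, dp)).1
      = acc ++ hs.filter (fun h => decide (pvSize children h < m)) := by
  intro hs
  induction hs with
  | nil => intro _ acc dp _; simp
  | cons b hs ih =>
    intro hsafe acc dp hdp
    have hμ : pvMu children b < children.length + 1 := by have := pvMu_le children b; omega
    obtain ⟨h1, h2⟩ := pvGbs_correct (children.length + 1) b dp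
      (hsafe b List.mem_cons_self) hμ hdp
    have hsafe' : ∀ h ∈ hs, pvSafe children h := fun h hh => hsafe h (List.mem_cons_of_mem _ hh)
    simp only [List.foldl_cons, List.filter_cons]
    by_cases hlt : pvSize children b < m
    · rw [ih hsafe' _ _ h2]
      simp [h1, hlt]
    · rw [ih hsafe' _ _ h2]
      simp [h1, hlt]

lemma pvGood_empty (children : List (String × List String)) : pvGood children PySem.Dict.empty := by
  intro k v h
  simp [PySem.Dict.get?_empty] at h

-- the filtered key list both ports iterate over is pvHeads
lemma pvFilter_eq_heads (children : List (String × List String)) :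
    (PySem.Dict.mk children).keys.filter
      (fun x => !(PySem.Set.ofList ((PySem.Dict.mk children).values.flatMap (fun tweet_children => tweet_children))).contains x)
    = pvHeads children := by
  unfold pvHeads
  apply List.filter_congr
  intro x _
  have hmem : (x ∈ (PySem.Dict.mk children).values.flatMap (fun tweet_children => tweet_children))
      ↔ x ∈ children.flatMap (fun p => p.2) := by
    simp only [PySem.Dict.values, List.mem_flatMap, List.mem_map]
    constructor
    · rintro ⟨l, ⟨⟨a, b⟩, hab, rfl⟩, hx⟩
      exact ⟨(a, b), hab, hx⟩
    · rintro ⟨⟨a, b⟩, hab, hx⟩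
      exact ⟨b, ⟨(a, b), hab, rfl⟩, hx⟩
  have hiff : ((PySem.Set.ofList ((PySem.Dict.mk children).values.flatMap (fun tweet_children => tweet_children))).contains x = true)
      ↔ x ∈ children.flatMap (fun p => p.2) := by
    rw [PySem.Set.contains_iff, PySem.Set.mem_ofList]
    exact hmem
  rcases Bool.eq_false_or_eq_true ((PySem.Set.ofList ((PySem.Dict.mk children).values.flatMap (fun tweet_children => tweet_children))).contains x) with hcb | hcb
  · rw [hcb]
    simp only [Bool.not_true]
    exact (decide_eq_false (not_not_intro (hiff.mp hcb))).symm
  · have hxn : x ∉ children.flatMap (fun p => p.2) := fun hmemx => by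
      have hh := hiff.mpr hmemx
      rw [hh] at hcb
      simp at hcb
    rw [hcb]
    simp only [Bool.not_false]
    exact (decide_eq_true hxn).symm

lemma pv_main {children : List (String × List String)} (m : Int)
    (hnodup : (children.map Prod.fst).Nodup)
    (hclo : ∀ h ∈ pvHeads children, ∀ x ∈ pvClosure children [h], x ∉ pvClosure children (pvKids children x)) :
    ∀ tweets, get_unwanted_tweet_ids tweets children m = get_unwanted_tweet_ids_alt tweets children m := by
  intro tweets
  have hsafe : ∀ h ∈ pvHeads children, pvSafe children h := pre_safe hclo
  unfold get_unwanted_tweet_ids get_unwanted_tweet_ids_alt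
  simp only []
  set ch := PySem.Dict.mk children with hch
  set cids := PySem.Set.ofList (ch.values.flatMap (fun tweet_children => tweet_children)) with hcids
  have hknodup : ch.keys.Nodup := by
    rw [hch, PySem.Dict.keys_mk]
    exact hnodup
  -- B's child_ids set is A's children_ids set
  have hchild_ids : ch.values.foldl (fun s tweet_children => PySem.Set.update s tweet_children) PySem.Set.empty = cids := by
    rw [foldl_update_eq, PySem.Set.update_empty]
  rw [hchild_ids]
  -- A's branch-head set is the filtered key list, i.e. pvHeads
  have hheads : PySem.Set.diff (PySem.Set.ofList ch.keys) cids = pvHeads children := by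
    rw [PySem.Set.ofList_eq_self_of_nodup _ hknodup]
    exact pvFilter_eq_heads children
  rw [hheads]
  -- A's fold over the heads, with dp threaded, keeps exactly the small heads
  rw [pvHeadsFold m _ hsafe [] PySem.Dict.empty (pvGood_empty children)]
  simp only [List.nil_append]
  have hr1nodup : ((pvHeads children).filter (fun h => decide (pvSize children h < m))).Nodup :=
    (hknodup.filter _).filter _
  rw [PySem.Set.ofList_eq_self_of_nodup _ hr1nodup]
  rw [PySem.Set.ofList_eq_foldl, List.foldl_flatMap]
  -- B's outer guard becomes a filter over the keys, giving the same pvHeads list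
  rw [PySem.List.foldl_congr_mem ch.keys _
    (fun (unwanted : PySem.Set String) head =>
      if (!cids.contains head) = true then
        (if pvCount ch m [head] 0 < m then
          PySem.Set.update (PySem.Set.add unwanted head) (ch.getD head [])
        else unwanted)
      else unwanted) PySem.Set.empty
    (by
      intro acc head _
      by_cases hc : head ∈ cids
      · simp [hc]
      · simp [hc])]
  rw [PySem.List.foldl_if_eq_foldl_filter (fun head => !cids.contains head)]
  rw [pvFilter_eq_heads children]
  -- on the heads the early-exit count decides exactly pvSize < m
  rw [PySem.List.foldl_congr_mem (pvHeads children) _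
    (fun (unwanted : PySem.Set String) head =>
      if (decide (pvSize children head < m)) = true then
        PySem.Set.update (PySem.Set.add unwanted head) (ch.getD head [])
      else unwanted) PySem.Set.empty
    (by
      intro acc head hhead
      have hone : ∀ x ∈ [head], pvSafe children x := by
        intro x hx
        rw [List.mem_singleton] at hx
        exact hx ▸ hsafe head hhead
      have hcnt : pvCount ch m [head] 0 < m ↔ pvSize children head < m := by
        rw [hch, pvCount_lt_iff m [head] 0 hone]
        simp
      by_cases hs : pvSize children head < m
      · simp [hs, hcnt]
      · simp [hs, hcnt])]
  rw [PySem.List.foldl_if_eq_foldl_filter (fun head => decide (pvSize children head < m))]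
  rfl

-- ===== VERDICT =====
theorem get_unwanted_tweet_ids_spec : Claim_equal_get_unwanted_tweet_ids := by
  intro tweets children min_branch_size hdom hpre
  obtain ⟨hnodup, hclo⟩ := hpre
  unfold Spec_get_unwanted_tweet_ids
  exact pv_main min_branch_size hnodup hclo tweets
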